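-- pv_equiv track=rewrite | github.com/rinoale/react-vite | scripts/v3/test_prefix_detector.py | _summary_str
-- ===== SOURCE A (Python) =====
-- def _summary_str(results):
--     b = sum(1 for r in results if r['type'] == 'bullet')
--     s = sum(1 for r in results if r['type'] == 'subbullet')
--     n = sum(1 for r in results if r['type'] is None)
--     parts = []
--     if b: parts.append(f"{b} bullet")
--     if s: parts.append(f"{s} subbullet")
--     if n: parts.append(f"{n} none")
--     return ', '.join(parts) if parts else 'nothing'
-- ===== SOURCE B (Python) =====
-- def _summary_str(results):
--     b = s = n = 0
--     for r in results:
--         t = r['type']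
--         if t == 'bullet':
--             b += 1
--         elif t == 'subbullet':
--             s += 1
--         elif t is None:
--             n += 1
--     parts = [f"{c} {label}" for c, label in zip((b, s, n), ("bullet", "subbullet", "none")) if c]
--     return ', '.join(parts) if parts else 'nothing'
-- ===== Notes on version B (the rewrite author's own statement) =====
-- stated objective: simpler
-- what changed: Replaces A's three staged generator-sum scans and its if/append chain with a single pass keeping a (b,s,n) accumulator in an if/elif dispatch, and builds the output table-driven by zipping the counts with their labels in one comprehension.
import Mathlib
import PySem

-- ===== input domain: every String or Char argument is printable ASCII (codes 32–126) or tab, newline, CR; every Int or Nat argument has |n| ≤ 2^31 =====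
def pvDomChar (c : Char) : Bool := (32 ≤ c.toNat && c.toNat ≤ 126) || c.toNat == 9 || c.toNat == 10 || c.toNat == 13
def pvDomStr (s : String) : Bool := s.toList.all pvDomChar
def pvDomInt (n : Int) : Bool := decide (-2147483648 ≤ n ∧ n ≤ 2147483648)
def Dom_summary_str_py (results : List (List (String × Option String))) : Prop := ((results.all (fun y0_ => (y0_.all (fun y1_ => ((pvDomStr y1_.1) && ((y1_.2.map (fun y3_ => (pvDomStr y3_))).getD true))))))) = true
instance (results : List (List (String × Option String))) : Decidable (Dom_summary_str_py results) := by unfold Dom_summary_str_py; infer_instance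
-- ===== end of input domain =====

-- B replaces A's three staged scans and if/append chain with one pass over the list keeping a (b,s,n) accumulator and a table-driven (counts zipped with labels) formatting step; same result on records having a 'type' key (else A raises KeyError).

-- ===== PORT A =====
-- A: three generator-sum scans, then an if/append chain building parts.
def summary_str_py (results : List (List (String × Option String))) : String :=
  let b : Int := results.foldl (fun acc r => if List.lookup "type" r == some (some "bullet") then acc + 1 else acc) 0
  let s : Int := results.foldl (fun acc r => if List.lookup "type" r == some (some "subbullet") then acc + 1 else acc) 0
  let n : Int := results.foldl (fun acc r => if List.lookup "type" r == some none then acc + 1 else acc) 0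
  let parts : List String := []
  let parts := if b ≠ 0 then parts ++ [PySem.Int.toStr b ++ " bullet"] else parts
  let parts := if s ≠ 0 then parts ++ [PySem.Int.toStr s ++ " subbullet"] else parts
  let parts := if n ≠ 0 then parts ++ [PySem.Int.toStr n ++ " none"] else parts
  if parts = [] then "nothing" else PySem.Str.join ", " parts

-- ===== PORT B =====
-- B: one pass with a (b,s,n) accumulator dispatched by if/elif, then zip-with-labels comprehension.
-- the if/elif dispatch of B's loop body
def pvStep (c : Int × Int × Int) (r : List (String × Option String)) : Int × Int × Int :=
  let t := List.lookup "type" r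
  if t == some (some "bullet") then (c.1 + 1, c.2.1, c.2.2)
  else if t == some (some "subbullet") then (c.1, c.2.1 + 1, c.2.2)
  else if t == some none then (c.1, c.2.1, c.2.2 + 1)
  else c

def summary_str_py_alt (results : List (List (String × Option String))) : String :=
  let c : Int × Int × Int := results.foldl pvStep (0, 0, 0)
  let parts : List String :=
    (List.zip [c.1, c.2.1, c.2.2] ["bullet", "subbullet", "none"]).filterMap
      (fun p => if p.1 ≠ 0 then some (PySem.Int.toStr p.1 ++ " " ++ p.2) else none)
  if parts = [] then "nothing" else PySem.Str.join ", " parts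

-- ===== PRECONDITION & SPEC =====
-- Pre_ excludes records without a 'type' key, on which A raises KeyError.
def Pre_summary_str_py (results : List (List (String × Option String))) : Prop :=
  ∀ r ∈ results, (List.lookup "type" r).isSome = true
instance (results : List (List (String × Option String))) : Decidable (Pre_summary_str_py results) := by unfold Pre_summary_str_py; infer_instance
def pvWitness_summary_str_py : (List (List (String × Option String))) := [[("type", some "bullet")], [("type", none)]]

def Spec_summary_str_py (results : List (List (String × Option String))) (out : String) : Prop := out = summary_str_py_alt results
instance (results : List (List (String × Option String))) (out : String) : Decidable (Spec_summary_str_py results out) := by unfold Spec_summary_str_py; infer_instance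

-- ===== CLAIM (what is proved, stated in full; the proofs are below) =====
def Claim_equal_summary_str_py : Prop := ∀ (results : List (List (String × Option String))), Dom_summary_str_py results → Pre_summary_str_py results → Spec_summary_str_py results (summary_str_py results)

-- ===== LEMMAS AND PROOFS =====

-- A's conditional-count fold is countP.
theorem foldl_count_if {α : Type} (p : α → Bool) (l : List α) (a : Int) :
    l.foldl (fun acc x => if p x then acc + 1 else acc) a = a + (l.countP p : Int) := by
  induction l generalizing a with
  | nil => simp
  | cons x xs ih =>
    simp only [List.foldl_cons, List.countP_cons, ih]
    cases h : p x <;> simp [add_comm, add_left_comm]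

-- B's single fold computes the same three counts as A's three scans.
theorem foldl_triple (l : List (List (String × Option String))) (a b c : Int) :
    l.foldl pvStep (a, b, c)
    = (a + (l.countP (fun r => List.lookup "type" r == some (some "bullet")) : Int),
       b + (l.countP (fun r => List.lookup "type" r == some (some "subbullet")) : Int),
       c + (l.countP (fun r => List.lookup "type" r == some none) : Int)) := by
  induction l generalizing a b c with
  | nil => simp
  | cons x xs ih =>
    rw [List.foldl_cons, List.countP_cons, List.countP_cons, List.countP_cons]
    rcases h : List.lookup "type" x with _ | t
    · have hx : pvStep (a, b, c) x = (a, b, c) := by simp [pvStep, h]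
      rw [hx, ih]; simp
    · rcases t with _ | s
      · have hx : pvStep (a, b, c) x = (a, b, c + 1) := by simp [pvStep, h]
        rw [hx, ih]; simp [Prod.ext_iff]; omega
      · by_cases hb : s = "bullet"
        · have hx : pvStep (a, b, c) x = (a + 1, b, c) := by simp [pvStep, h, hb]
          rw [hx, ih]; simp [hb, Prod.ext_iff]; omega
        · by_cases hs : s = "subbullet"
          · have hx : pvStep (a, b, c) x = (a, b + 1, c) := by simp [pvStep, h, hs]
            rw [hx, ih]; simp [hs, Prod.ext_iff]; omega
          · have hx : pvStep (a, b, c) x = (a, b, c) := by simp [pvStep, h, hb, hs]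
            rw [hx, ih]; simp [hb, hs]

-- ===== VERDICT (by name: the statement is the Claim_ definition above) =====

theorem summary_str_py_spec : Claim_equal_summary_str_py := by
  intro results _ _
  unfold Spec_summary_str_py summary_str_py summary_str_py_alt
  simp only [foldl_triple, foldl_count_if, zero_add]
  set b := (results.countP (fun r => List.lookup "type" r == some (some "bullet")) : Int)
  set s := (results.countP (fun r => List.lookup "type" r == some (some "subbullet")) : Int)
  set n := (results.countP (fun r => List.lookup "type" r == some none) : Int)
  by_cases hb : b = 0 <;> by_cases hs : s = 0 <;> by_cases hn : n = 0 <;>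
    simp [hb, hs, hn, List.zip, List.zipWith, List.filterMap, PySem.Str.join]
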